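-- pv_equiv track=rewrite | github.com/anyfree8/620search | scripts/search_engine.py | _check_proximity
-- ===== SOURCE A (Python) =====
-- from typing import Dict, List, Set, Tuple, Any
--
-- def _check_proximity(term_positions: Dict[str, List[int]], max_distance: int) -> bool:
--     """Проверка расстояния между термами"""
--     # Получаем все позиции термов
--     all_positions = []
--     for term, positions in term_positions.items():
--         for pos in positions:
--             all_positions.append((pos, term))
--
--     # Сортируем по позиции
--     all_positions.sort()
--
--     # Проверяем расстояние между соседними термами
--     for i in range(len(all_positions) - 1):
--         pos1, term1 = all_positions[i]
--         pos2, term2 = all_positions[i + 1]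
--
--         if term1 != term2 and abs(pos2 - pos1) <= max_distance:
--             return True
--
--     return False
-- ===== SOURCE B (Python) =====
-- from typing import Dict, List
--
--
-- def _check_proximity(term_positions: Dict[str, List[int]], max_distance: int) -> bool:
--     """Entry-level pairwise scan: compare the position lists of each pair of
--     distinct terms directly; no flat list, no sort."""
--     items = list(term_positions.items())
--     for i, (t1, ps1) in enumerate(items):
--         for t2, ps2 in items[i + 1:]:
--             if t1 != t2 and any(abs(p1 - p2) <= max_distance
--                                 for p1 in ps1 for p2 in ps2):
--                 return True
--     return False
-- ===== Notes on version B (the rewrite author's own statement) =====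
-- stated objective: alternative
-- what changed: B never builds or sorts a flat (pos, term) list: it scans pairs of dict entries directly, comparing the two position lists of each pair of distinct terms and returning True on the first pair within max_distance.
import Mathlib
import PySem

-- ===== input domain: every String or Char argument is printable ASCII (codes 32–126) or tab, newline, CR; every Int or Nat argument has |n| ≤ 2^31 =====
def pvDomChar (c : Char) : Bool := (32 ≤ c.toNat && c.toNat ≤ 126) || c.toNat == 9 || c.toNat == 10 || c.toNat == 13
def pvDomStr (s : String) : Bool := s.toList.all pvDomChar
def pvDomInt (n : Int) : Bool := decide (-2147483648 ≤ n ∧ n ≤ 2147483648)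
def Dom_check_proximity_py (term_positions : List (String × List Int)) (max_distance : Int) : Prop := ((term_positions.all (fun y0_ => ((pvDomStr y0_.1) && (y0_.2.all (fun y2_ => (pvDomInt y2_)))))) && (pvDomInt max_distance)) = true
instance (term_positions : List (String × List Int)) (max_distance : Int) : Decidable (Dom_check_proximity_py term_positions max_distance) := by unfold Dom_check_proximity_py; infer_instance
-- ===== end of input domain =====

-- B skips A's flatten-and-sort entirely and scans pairs of dict entries directly
-- (objective: alternative — no flat list, no sort, same return value).

-- ===== PORT A =====
-- all_positions = []; for term, positions in ...: for pos in positions: all_positions.append((pos, term))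
def pvFlatten (term_positions : List (String × List Int)) : List (Int × String) :=
  term_positions.foldl
    (fun acc pr => pr.2.foldl (fun acc2 pos => acc2 ++ [(pos, pr.1)]) acc) []

-- for i in range(len(all_positions) - 1): compare all_positions[i] and all_positions[i+1]
def pvAdjScan (d : Int) : List (Int × String) → Bool
  | p :: q :: rest =>
      (decide (p.2 ≠ q.2) && decide (|q.1 - p.1| ≤ d)) || pvAdjScan d (q :: rest)
  | _ => false

def check_proximity_py (term_positions : List (String × List Int)) (max_distance : Int) : Bool :=
  pvAdjScan max_distance
    (PySem.List.sorted2 (pvFlatten term_positions) (fun p => p.1) (fun p => p.2))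

-- ===== PORT B =====
-- if t1 != t2 and any(abs(p1 - p2) <= max_distance for p1 in ps1 for p2 in ps2)
def pvListsClose (d : Int) (ps1 ps2 : List Int) : Bool :=
  ps1.any (fun p1 => ps2.any (fun p2 => decide (|p1 - p2| ≤ d)))

-- for i, (t1, ps1) in enumerate(items): for t2, ps2 in items[i+1:]: ...
def pvEntryScan (d : Int) : List (String × List Int) → Bool
  | [] => false
  | e :: rest =>
      rest.any (fun f => decide (e.1 ≠ f.1) && pvListsClose d e.2 f.2) || pvEntryScan d rest

def check_proximity_py_alt (term_positions : List (String × List Int)) (max_distance : Int) : Bool :=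
  pvEntryScan max_distance term_positions

-- ===== PRECONDITION & SPEC =====
def Spec_check_proximity_py (term_positions : List (String × List Int)) (max_distance : Int) (out : Bool) : Prop := out = check_proximity_py_alt term_positions max_distance
instance (term_positions : List (String × List Int)) (max_distance : Int) (out : Bool) : Decidable (Spec_check_proximity_py term_positions max_distance out) := by unfold Spec_check_proximity_py; infer_instance

-- ===== CLAIM (what is proved, stated in full; the proofs are below) =====
def Claim_equal_check_proximity_py : Prop := ∀ (term_positions : List (String × List Int)) (max_distance : Int), Dom_check_proximity_py term_positions max_distance → Spec_check_proximity_py term_positions max_distance (check_proximity_py term_positions max_distance)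

-- ===== LEMMAS AND PROOFS =====

-- The shared existence predicate both programs decide, phrased over the flat list:
-- some two entries carry different terms and lie within distance d of each other.
def pvNear (d : Int) (xs : List (Int × String)) : Prop :=
  ∃ p ∈ xs, ∃ q ∈ xs, p.2 ≠ q.2 ∧ |p.1 - q.1| ≤ d

theorem pvNear_perm {d : Int} {xs ys : List (Int × String)} (h : xs.Perm ys) :
    pvNear d xs ↔ pvNear d ys := by
  unfold pvNear
  simp only [h.mem_iff]

theorem pvFlatten_eq (tp : List (String × List Int)) :
    pvFlatten tp = tp.flatMap (fun pr => pr.2.map (fun p => (p, pr.1))) := by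
  have inner : ∀ (t : String) (ps : List Int) (acc : List (Int × String)),
      ps.foldl (fun acc2 pos => acc2 ++ [(pos, t)]) acc = acc ++ ps.map (fun p => (p, t)) := by
    intro t ps
    induction ps with
    | nil => simp
    | cons p ps ih => intro acc; simp [ih]
  have outer : ∀ (l : List (String × List Int)) (acc : List (Int × String)),
      l.foldl (fun acc pr => pr.2.foldl (fun acc2 pos => acc2 ++ [(pos, pr.1)]) acc) acc =
        acc ++ l.flatMap (fun pr => pr.2.map (fun p => (p, pr.1))) := by
    intro l
    induction l with
    | nil => simp
    | cons e l ih =>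
        intro acc
        rw [List.foldl_cons, inner, ih, List.flatMap_cons, List.append_assoc]
  rw [pvFlatten, outer tp [], List.nil_append]

theorem mem_pvFlatten {tp : List (String × List Int)} {p : Int} {t : String} :
    (p, t) ∈ pvFlatten tp ↔ ∃ e ∈ tp, e.1 = t ∧ p ∈ e.2 := by
  rw [pvFlatten_eq]
  simp only [List.mem_flatMap, List.mem_map, Prod.mk.injEq]
  constructor
  · rintro ⟨e, he, q, hq, rfl, rfl⟩; exact ⟨e, he, rfl, hq⟩
  · rintro ⟨e, he, rfl, hp⟩; exact ⟨e, he, p, hp, rfl, rfl⟩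

-- B decides: two entries with different terms hold positions within d.
theorem pvEntryScan_iff (d : Int) (l : List (String × List Int)) :
    pvEntryScan d l = true ↔
      ∃ e ∈ l, ∃ f ∈ l, e.1 ≠ f.1 ∧ ∃ p ∈ e.2, ∃ q ∈ f.2, |p - q| ≤ d := by
  induction l with
  | nil => simp [pvEntryScan]
  | cons e rest ih =>
    simp only [pvEntryScan, Bool.or_eq_true, List.any_eq_true, Bool.and_eq_true,
      decide_eq_true_eq, pvListsClose, ih]
    constructor
    · rintro (⟨f, hf, hne, hc⟩ | ⟨a, ha, b, hb, hne, hc⟩)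
      · exact ⟨e, List.mem_cons_self .., f, List.mem_cons_of_mem _ hf, hne, hc⟩
      · exact ⟨a, List.mem_cons_of_mem _ ha, b, List.mem_cons_of_mem _ hb, hne, hc⟩
    · rintro ⟨a, ha, b, hb, hne, p, hp, q, hq, hd⟩
      rcases List.mem_cons.1 ha with rfl | ha'
      · rcases List.mem_cons.1 hb with rfl | hb'
        · exact absurd rfl hne
        · exact Or.inl ⟨b, hb', hne, p, hp, q, hq, hd⟩
      · rcases List.mem_cons.1 hb with rfl | hb'
        · exact Or.inl ⟨a, ha', Ne.symm hne, q, hq, p, hp, by rw [abs_sub_comm]; exact hd⟩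
        · exact Or.inr ⟨a, ha', b, hb', hne, p, hp, q, hq, hd⟩

theorem pvEntryScan_iff_near (d : Int) (tp : List (String × List Int)) :
    pvEntryScan d tp = true ↔ pvNear d (pvFlatten tp) := by
  rw [pvEntryScan_iff]
  unfold pvNear
  constructor
  · rintro ⟨e, he, f, hf, hne, p, hp, q, hq, hd⟩
    exact ⟨(p, e.1), mem_pvFlatten.2 ⟨e, he, rfl, hp⟩,
           (q, f.1), mem_pvFlatten.2 ⟨f, hf, rfl, hq⟩, hne, hd⟩
  · rintro ⟨⟨p, t1⟩, hp, ⟨q, t2⟩, hq, hne, hd⟩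
    rcases mem_pvFlatten.1 hp with ⟨e, he, h1, hpe⟩
    rcases mem_pvFlatten.1 hq with ⟨f, hf, h2, hqf⟩
    exact ⟨e, he, f, hf, by simp_all, p, hpe, q, hqf, hd⟩

theorem pvAdjScan_imp {d : Int} {ys : List (Int × String)}
    (h : pvAdjScan d ys = true) : pvNear d ys := by
  induction ys with
  | nil => simp [pvAdjScan] at h
  | cons p rest ih =>
    cases rest with
    | nil => simp [pvAdjScan] at h
    | cons q rest' =>
      simp only [pvAdjScan, Bool.or_eq_true, Bool.and_eq_true, decide_eq_true_eq] at h
      rcases h with ⟨hne, hd⟩ | h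
      · exact ⟨p, List.mem_cons_self .., q, List.mem_cons_of_mem _ (List.mem_cons_self ..),
          hne, by rw [abs_sub_comm]; exact hd⟩
      · rcases ih h with ⟨a, ha, b, hb, hne, hd⟩
        exact ⟨a, List.mem_cons_of_mem _ ha, b, List.mem_cons_of_mem _ hb, hne, hd⟩

theorem pvNear_imp_adjScan {d : Int} {ys : List (Int × String)}
    (hs : ys.Pairwise (fun a b => a.1 ≤ b.1)) (h : pvNear d ys) :
    pvAdjScan d ys = true := by
  induction ys with
  | nil => rcases h with ⟨a, ha, _⟩; simp at ha
  | cons y ys' ih =>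
    rcases List.pairwise_cons.1 hs with ⟨hy, hs'⟩
    rcases h with ⟨a, ha, b, hb, hne, hd⟩
    have key : (∃ q ∈ ys', y.2 ≠ q.2 ∧ |y.1 - q.1| ≤ d) ∨ pvNear d ys' := by
      rcases List.mem_cons.1 ha with rfl | ha'
      · rcases List.mem_cons.1 hb with rfl | hb'
        · exact absurd rfl hne
        · exact Or.inl ⟨b, hb', hne, hd⟩
      · rcases List.mem_cons.1 hb with rfl | hb'
        · exact Or.inl ⟨a, ha', Ne.symm hne, by rw [abs_sub_comm]; exact hd⟩
        · exact Or.inr ⟨a, ha', b, hb', hne, hd⟩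
    cases ys' with
    | nil =>
      rcases key with ⟨q, hq, _⟩ | ⟨a', ha', _⟩ <;> simp_all
    | cons z rest =>
      simp only [pvAdjScan, Bool.or_eq_true, Bool.and_eq_true, decide_eq_true_eq]
      rcases key with ⟨q, hq, hne', hd'⟩ | hnear
      · have hyq : y.1 ≤ q.1 := hy q hq
        have hyz : y.1 ≤ z.1 := hy z (List.mem_cons_self ..)
        have hzq : z.1 ≤ q.1 := by
          rcases List.mem_cons.1 hq with rfl | hq
          · exact le_refl _
          · exact (List.pairwise_cons.1 hs').1 q hq
        by_cases hz : y.2 = z.2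
        · right
          refine ih hs' ⟨z, List.mem_cons_self .., q, hq, ?_, ?_⟩
          · rw [← hz]; exact hne'
          · rw [abs_le] at hd' ⊢; omega
        · left
          exact ⟨hz, by rw [abs_le] at hd' ⊢; omega⟩
      · exact Or.inr (ih hs' hnear)

-- Python's sort comparator on (pos, term) tuples: lexicographic strict order on Int × String.
theorem pvInsertBy_pairwise (x : Int × String) (ys : List (Int × String))
    (before : Int × String → Int × String → Bool)
    (hbef : ∀ a b, before a b = (decide (a.1 < b.1) || (!decide (b.1 < a.1) && decide (a.2 < b.2))))
    (hs : ys.Pairwise (fun a b => before b a = false)) :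
    (PySem.List.insertBy before x ys).Pairwise (fun a b => before b a = false) := by
  induction ys with
  | nil => simp [PySem.List.insertBy]
  | cons y ys' ih =>
    rcases List.pairwise_cons.1 hs with ⟨hy, hs'⟩
    by_cases hxy : before x y = true
    · have : PySem.List.insertBy before x (y :: ys') = x :: y :: ys' := by
        simp [PySem.List.insertBy, hxy]
      rw [this]
      refine List.pairwise_cons.2 ⟨?_, hs⟩
      intro z hz
      rcases List.mem_cons.1 hz with rfl | hz'
      · simp only [hbef, Bool.or_eq_true, Bool.and_eq_true, Bool.not_eq_true', decide_eq_true_eq,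
          decide_eq_false_iff_not, Bool.or_eq_false_iff, Bool.and_eq_false_iff,
          Bool.not_eq_false'] at hxy ⊢
        rcases hxy with h1 | ⟨h1, h2⟩
        · exact ⟨by omega, Or.inl (by omega)⟩
        · exact ⟨by omega, Or.inr (lt_asymm h2)⟩
      · have hzy : before z y = false := hy z hz'
        simp only [hbef, Bool.or_eq_true, Bool.and_eq_true, Bool.not_eq_true', decide_eq_true_eq,
          decide_eq_false_iff_not, Bool.or_eq_false_iff, Bool.and_eq_false_iff,
          Bool.not_eq_false'] at hxy hzy ⊢
        rcases hzy with ⟨h3, h4⟩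
        rcases hxy with h5 | ⟨h5, h6⟩
        · exact ⟨by omega, Or.inl (by omega)⟩
        · rcases h4 with h4 | h4
          · exact ⟨by omega, Or.inl (by omega)⟩
          · exact ⟨by omega, Or.inr (fun hc => h4 (lt_trans hc h6))⟩
    · have hxy' : before x y = false := by simpa using hxy
      have : PySem.List.insertBy before x (y :: ys') = y :: PySem.List.insertBy before x ys' := by
        simp [PySem.List.insertBy, hxy']
      rw [this]
      refine List.pairwise_cons.2 ⟨?_, ih hs'⟩
      intro z hz
      rcases (PySem.List.mem_insertBy before x z ys').1 hz with rfl | hz'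
      · exact hxy'
      · exact hy z hz'

theorem pvSorted2_pairwise (xs : List (Int × String)) :
    (PySem.List.sorted2 xs (fun p => p.1) (fun p => p.2)).Pairwise (fun a b => a.1 ≤ b.1) := by
  have main : ∀ (l : List (Int × String)) (acc : List (Int × String)),
      acc.Pairwise (fun a b =>
        (decide (b.1 < a.1) || (!decide (a.1 < b.1) && decide (b.2 < a.2))) = false) →
      (l.foldl (fun acc x => PySem.List.insertBy
          (fun a b => decide (a.1 < b.1) || (!decide (b.1 < a.1) && decide (a.2 < b.2))) x acc)
        acc).Pairwise (fun a b =>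
        (decide (b.1 < a.1) || (!decide (a.1 < b.1) && decide (b.2 < a.2))) = false) := by
    intro l
    induction l with
    | nil => intro acc h; simpa using h
    | cons x t ih =>
      intro acc h
      exact ih _ (pvInsertBy_pairwise x acc _ (fun a b => rfl) h)
  have h := main xs [] (by simp)
  have heq : PySem.List.sorted2 xs (fun p : Int × String => p.1) (fun p => p.2) =
      xs.foldl (fun acc x => PySem.List.insertBy
        (fun a b => decide (a.1 < b.1) || (!decide (b.1 < a.1) && decide (a.2 < b.2))) x acc) [] := rfl
  rw [heq]
  refine h.imp ?_
  intro a b hab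
  simp only [Bool.or_eq_false_iff, Bool.and_eq_false_iff, Bool.not_eq_false',
    decide_eq_true_eq, decide_eq_false_iff_not] at hab
  omega

-- ===== VERDICT (by name: the statement is the Claim_ definition above) =====
theorem check_proximity_py_spec : Claim_equal_check_proximity_py := by
  intro tp d _
  unfold Spec_check_proximity_py check_proximity_py check_proximity_py_alt
  set xs := pvFlatten tp with hxs
  have hperm : (PySem.List.sorted2 xs (fun p => p.1) (fun p => p.2)).Perm xs :=
    PySem.List.sorted2_perm xs _ _ false
  have hpair := pvSorted2_pairwise xs
  by_cases hB : pvEntryScan d tp = true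
  · have hnear : pvNear d xs := (pvEntryScan_iff_near d tp).1 hB
    have : pvNear d (PySem.List.sorted2 xs (fun p => p.1) (fun p => p.2)) :=
      (pvNear_perm hperm).2 hnear
    rw [hB, pvNear_imp_adjScan hpair this]
  · have hB' : pvEntryScan d tp = false := by simpa using hB
    rw [hB']
    by_contra hA
    have hA' : pvAdjScan d (PySem.List.sorted2 xs (fun p => p.1) (fun p => p.2)) = true := by
      simpa using hA
    have : pvNear d xs := (pvNear_perm hperm).1 (pvAdjScan_imp hA')
    exact hB ((pvEntryScan_iff_near d tp).2 this)
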